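-- pv_equiv track=rewrite | github.com/NTUST-CFDlab/PINNs | PINN-Error_Estimation/MMS/Equation_Database.py | Call_Calc_Until
-- ===== SOURCE A (Python) =====
-- def Call_Calc_Until(Filter):
--     Calc_Until = 0                  # 0 = Coor, 1 = Main Var, 2 = D1, 3 = D2
--     for i in range(len(Filter)):
--         if (Filter[i] == "M"):
--             if Calc_Until < 1:
--                 Calc_Until = 1
--         elif (Filter[i] == "D1"):
--             if Calc_Until < 2:
--                 Calc_Until = 2
--         else:
--             Calc_Until = 3
--     return Calc_Until
-- ===== SOURCE B (Python) =====
-- def Call_Calc_Until(Filter):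
--     if any(t != "M" and t != "D1" for t in Filter):
--         return 3
--     if any(t == "D1" for t in Filter):
--         return 2
--     if any(t == "M" for t in Filter):
--         return 1
--     return 0
-- ===== Notes on version B (the rewrite author's own statement) =====
-- stated objective: simpler
-- what changed: Replaced the running-max accumulator loop over indices by three short-circuiting element-wise presence checks in priority order (any non-M/non-D1 -> 3, else D1 present -> 2, else M present -> 1, else 0).
import Mathlib
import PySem

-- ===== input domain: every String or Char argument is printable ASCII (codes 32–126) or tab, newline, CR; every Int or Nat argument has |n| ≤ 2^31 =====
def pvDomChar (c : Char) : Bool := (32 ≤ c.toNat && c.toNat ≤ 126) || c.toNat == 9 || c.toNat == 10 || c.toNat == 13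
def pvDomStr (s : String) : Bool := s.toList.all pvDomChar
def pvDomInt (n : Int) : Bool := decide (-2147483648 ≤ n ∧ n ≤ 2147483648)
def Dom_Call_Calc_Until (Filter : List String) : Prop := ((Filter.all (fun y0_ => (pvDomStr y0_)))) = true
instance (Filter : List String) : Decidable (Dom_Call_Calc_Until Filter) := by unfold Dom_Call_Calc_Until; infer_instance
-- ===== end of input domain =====

-- B replaces A's index-loop with a running max by three short-circuiting priority membership checks (objective: simpler).

-- ===== PORT A =====
-- loop body of A: one iteration of the for-loop on accumulator Calc_Until with element t = Filter[i]
def ccuStep (acc : Int) (t : String) : Int :=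
  if t == "M" then (if acc < 1 then 1 else acc)
  else if t == "D1" then (if acc < 2 then 2 else acc)
  else 3

def Call_Calc_Until (Filter : List String) : Int :=
  (PySem.List.pyRange 0 Filter.length 1).foldl
    (fun acc i => ccuStep acc (PySem.List.pyGetD Filter i "")) 0

-- ===== PORT B =====
def Call_Calc_Until_alt (Filter : List String) : Int :=
  if Filter.any (fun t => t != "M" && t != "D1") then 3
  else if Filter.any (fun t => t == "D1") then 2
  else if Filter.any (fun t => t == "M") then 1
  else 0

-- ===== PRECONDITION & SPEC =====
def Spec_Call_Calc_Until (Filter : List String) (out : Int) : Prop := out = Call_Calc_Until_alt Filter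
instance (Filter : List String) (out : Int) : Decidable (Spec_Call_Calc_Until Filter out) := by unfold Spec_Call_Calc_Until; infer_instance

-- ===== CLAIM (what is proved, stated in full; the proofs are below) =====
def Claim_equal_Call_Calc_Until : Prop := ∀ (Filter : List String), Dom_Call_Calc_Until Filter → Spec_Call_Calc_Until Filter (Call_Calc_Until Filter)

-- ===== LEMMAS AND PROOFS =====

-- B's value of a cons is the max of the element's level and B's value of the tail
theorem alt_cons (t : String) (F : List String) :
    Call_Calc_Until_alt (t :: F) =
      max (ccuStep 0 t) (Call_Calc_Until_alt F) := by
  unfold Call_Calc_Until_alt ccuStep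
  by_cases hM : t = "M"
  · subst hM; simp; split_ifs <;> omega
  · by_cases hD : t = "D1"
    · subst hD; simp; split_ifs <;> omega
    · simp [hM, hD]; split_ifs <;> omega

theorem alt_le_three (F : List String) : Call_Calc_Until_alt F ≤ 3 := by
  unfold Call_Calc_Until_alt; split_ifs <;> omega

theorem ccuStep_max (a : Int) (ha : a ≤ 3) (t : String) :
    ccuStep a t = max a (ccuStep 0 t) := by
  unfold ccuStep
  split_ifs <;> omega

-- the loop with any start a ≤ 3 computes max a (B's value)
theorem foldl_step_eq (F : List String) : ∀ a : Int, 0 ≤ a → a ≤ 3 →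
    F.foldl ccuStep a = max a (Call_Calc_Until_alt F) := by
  induction F with
  | nil => intro a h0 _; simp [Call_Calc_Until_alt]; omega
  | cons t F ih =>
      intro a h0 ha
      have hstep0 : 0 ≤ ccuStep a t := by unfold ccuStep; split_ifs <;> omega
      have hstep : ccuStep a t ≤ 3 := by unfold ccuStep; split_ifs <;> omega
      rw [List.foldl_cons, ih _ hstep0 hstep, alt_cons, ccuStep_max a ha t]
      omega

-- ===== VERDICT (by name: the statement is the Claim_ definition above) =====
theorem Call_Calc_Until_spec : Claim_equal_Call_Calc_Until := by
  intro F _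
  unfold Spec_Call_Calc_Until Call_Calc_Until
  rw [PySem.List.foldl_pyRange_zero_pyGetD' F "" ccuStep 0]
  rw [foldl_step_eq F 0 (by omega) (by omega)]
  have := alt_le_three F
  -- max 0 v = v since 0 ≤ v
  unfold Call_Calc_Until_alt
  split_ifs <;> omega
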